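-- pv_equiv track=rewrite | github.com/Gapryong-Kim/Cryptiq1 | CryptiQ/cipher_tools/polybius_square.py | _find_two_letter_runs
-- ===== SOURCE A (Python) =====
-- def _find_two_letter_runs(CT_UP, min_run=40):
--     """
--     Mask long 2-symbol-only sequences (letters OR digits) from scoring.
--     """
--     n = len(CT_UP)
--     mask = [False] * n
--
--     binary_sets = {
--         frozenset(("A", "B")),
--         frozenset(("E", "U")),
--         frozenset(("O", "I")),
--         frozenset(("0", "1")),
--         frozenset(("X", "O")),
--     }
--
--     i = 0
--     while i < n:
--         if not (CT_UP[i].isalpha() or CT_UP[i].isdigit()):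
--             i += 1
--             continue
--
--         j = i
--         while j < n and (CT_UP[j].isalpha() or CT_UP[j].isdigit()):
--             j += 1
--
--         run = CT_UP[i:j]
--         uniq = frozenset(run)
--
--         if len(uniq) == 2 and len(run) >= min_run and uniq in binary_sets:
--             for k in range(i, j):
--                 mask[k] = True
--
--         i = j
--
--     return mask
-- ===== SOURCE B (Python) =====
-- def _find_two_letter_runs(CT_UP, min_run=40):
--     """
--     Mask long 2-symbol-only sequences (letters OR digits) from scoring.
--     Single streaming pass: group consecutive characters of the same
--     alphanumeric class, emit one flag per group.
--     """
--     binary_sets = (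
--         frozenset(("A", "B")),
--         frozenset(("E", "U")),
--         frozenset(("O", "I")),
--         frozenset(("0", "1")),
--         frozenset(("X", "O")),
--     )
--
--     mask = []
--     run = []          # characters of the current same-class run
--     key = None        # class (alnum or not) of the current run
--
--     for c in CT_UP:
--         k = c.isalpha() or c.isdigit()
--         if run and k != key:
--             flag = key and len(run) >= min_run and frozenset(run) in binary_sets
--             mask += [flag] * len(run)
--             run = []
--         key = k
--         run.append(c)
--
--     if run:
--         flag = key and len(run) >= min_run and frozenset(run) in binary_sets
--         mask += [flag] * len(run)
--
--     return mask
-- ===== Notes on version B (the rewrite author's own statement) =====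
-- stated objective: simpler
-- what changed: Replaces the nested index-scanning loops and in-place writes into a preallocated mask by a single streaming pass that accumulates the current same-class run and appends one flag per run (the redundant len(uniq)==2 test is dropped, since every set in binary_sets has exactly two elements).
import Mathlib
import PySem

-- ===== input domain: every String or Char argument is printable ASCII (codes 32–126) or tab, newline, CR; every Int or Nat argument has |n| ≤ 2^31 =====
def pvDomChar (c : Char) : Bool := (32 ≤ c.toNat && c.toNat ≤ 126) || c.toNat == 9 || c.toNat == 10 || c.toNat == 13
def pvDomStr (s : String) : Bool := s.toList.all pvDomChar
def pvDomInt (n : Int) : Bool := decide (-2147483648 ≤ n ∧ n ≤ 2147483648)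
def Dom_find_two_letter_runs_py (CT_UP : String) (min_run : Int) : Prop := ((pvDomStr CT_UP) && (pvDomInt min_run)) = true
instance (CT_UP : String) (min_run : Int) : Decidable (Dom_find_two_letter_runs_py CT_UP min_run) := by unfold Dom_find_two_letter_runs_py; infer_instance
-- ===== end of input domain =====

-- B replaces A's nested index-scanning loops and in-place writes into a preallocated mask by a
-- single streaming pass accumulating the current same-class run (objective: simpler; same O(n)).

-- ===== PORT A =====

-- CT_UP[x].isalpha() or CT_UP[x].isdigit()  (shared by both ports: both Pythons use this predicate)
def pvIsSym (c : Char) : Bool := PySem.Chars.isalpha c || PySem.Chars.isdigit c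

-- frozenset equality (same elements); `uniq in binary_sets` is equality with one of the five sets.
def pvSetEq (u v : List Char) : Bool := u.all (fun c => v.contains c) && v.all (fun c => u.contains c)

-- membership of `uniq` in the binary_sets constant (identical literal in A and in B)
def pvIsBinary (u : List Char) : Bool :=
  pvSetEq u ['A', 'B'] || pvSetEq u ['E', 'U'] || pvSetEq u ['O', 'I'] ||
    pvSetEq u ['0', '1'] || pvSetEq u ['X', 'O']

-- inner `while j < n and (CT_UP[j].isalpha() or CT_UP[j].isdigit()): j += 1`
-- (fuel = remaining positions, a pure totality guard: `cs.length - j` steps always suffice)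
def pvScanEnd (cs : List Char) (j : Nat) (fuel : Nat) : Nat :=
  match fuel with
  | 0 => j
  | fuel + 1 =>
      if j < cs.length ∧ pvIsSym (cs.getD j ' ') then pvScanEnd cs (j + 1) fuel else j

-- `for k in range(i, j): mask[k] = True`
def pvSetTrue (mask : List Bool) (i j : Nat) : List Bool :=
  (List.range' i (j - i)).foldl (fun m k => m.set k true) mask

-- the outer `while i < n` loop of A (fuel: each iteration advances i by at least one)
def pvLoopA (cs : List Char) (min_run : Int) (mask : List Bool) (i : Nat) (fuel : Nat) :
    List Bool :=
  match fuel with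
  | 0 => mask
  | fuel + 1 =>
      if i < cs.length then
        if ¬ pvIsSym (cs.getD i ' ') then
          pvLoopA cs min_run mask (i + 1) fuel
        else
          let j := pvScanEnd cs i (cs.length - i)
          let run := (cs.drop i).take (j - i)    -- CT_UP[i:j] with 0 ≤ i ≤ j: exactly drop/take
          let uniq := PySem.Set.ofList run       -- frozenset(run)
          let mask' := if uniq.length == 2 && decide (min_run ≤ (run.length : Int)) &&
                          pvIsBinary uniq
                       then pvSetTrue mask i j else mask
          pvLoopA cs min_run mask' j fuel
      else mask

def find_two_letter_runs_py (CT_UP : String) (min_run : Int) : List Bool :=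
  pvLoopA CT_UP.toList min_run (List.replicate CT_UP.toList.length false) 0 CT_UP.toList.length

-- ===== PORT B =====

-- `flag = key and len(run) >= min_run and frozenset(run) in binary_sets`
def pvFlagB (min_run : Int) (key : Bool) (run : List Char) : Bool :=
  key && decide (min_run ≤ (run.length : Int)) && pvIsBinary (PySem.Set.ofList run)

-- the single `for c in CT_UP` pass of B; key is None before the first character
def pvLoopB (min_run : Int) (cs : List Char) (mask : List Bool) (run : List Char)
    (key : Option Bool) : List Bool :=
  match cs with
  | [] =>
      if run ≠ [] then mask ++ List.replicate run.length (pvFlagB min_run (key.getD false) run)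
      else mask
  | c :: rest =>
      let k := pvIsSym c
      if run ≠ [] ∧ key ≠ some k then
        pvLoopB min_run rest
          (mask ++ List.replicate run.length (pvFlagB min_run (key.getD false) run)) [c] (some k)
      else
        pvLoopB min_run rest mask (run ++ [c]) (some k)

def find_two_letter_runs_py_alt (CT_UP : String) (min_run : Int) : List Bool :=
  pvLoopB min_run CT_UP.toList [] [] none

-- ===== PRECONDITION & SPEC =====
def Spec_find_two_letter_runs_py (CT_UP : String) (min_run : Int) (out : List Bool) : Prop := out = find_two_letter_runs_py_alt CT_UP min_run
instance (CT_UP : String) (min_run : Int) (out : List Bool) : Decidable (Spec_find_two_letter_runs_py CT_UP min_run out) := by unfold Spec_find_two_letter_runs_py; infer_instance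

-- ===== CLAIM (what is proved, stated in full; the proofs are below) =====
def Claim_equal_find_two_letter_runs_py : Prop := ∀ (CT_UP : String) (min_run : Int), Dom_find_two_letter_runs_py CT_UP min_run → Spec_find_two_letter_runs_py CT_UP min_run (find_two_letter_runs_py CT_UP min_run)

-- ===== LEMMAS AND PROOFS =====

-- maximal same-class chunks of the string (proof-side common denominator of both loops)
def pvChunks (cs : List Char) : List (List Char) :=
  match cs with
  | [] => []
  | c :: rest =>
      (c :: rest.takeWhile (fun d => pvIsSym d == pvIsSym c)) ::
        pvChunks (rest.dropWhile (fun d => pvIsSym d == pvIsSym c))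
termination_by cs.length
decreasing_by
  have := (List.dropWhile_sublist (l := rest) (p := fun d => pvIsSym d == pvIsSym c)).length_le
  simpa using Nat.lt_succ_of_le this

def pvChunksFlat (m : Int) (cs : List Char) : List Bool :=
  (pvChunks cs).flatMap fun g => List.replicate g.length (pvFlagB m (pvIsSym (g.headD ' ')) g)

-- all elements of a takeWhile satisfy the predicate; a nonempty dropWhile starts with a failure
theorem pvTakeWhile_append (p : Char → Bool) (l1 l2 : List Char) (h : ∀ x ∈ l1, p x = true) :
    (l1 ++ l2).takeWhile p = l1 ++ l2.takeWhile p := by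
  induction l1 with
  | nil => simp
  | cons a t ih =>
      simp [h a (by simp), ih (fun x hx => h x (by simp [hx]))]

theorem pvDropWhile_append (p : Char → Bool) (l1 l2 : List Char) (h : ∀ x ∈ l1, p x = true) :
    (l1 ++ l2).dropWhile p = l2.dropWhile p := by
  induction l1 with
  | nil => simp
  | cons a t ih =>
      simp [h a (by simp), ih (fun x hx => h x (by simp [hx]))]

theorem pvDropWhile_head (p : Char → Bool) (l : List Char) (x : Char) (u : List Char)
    (h : l.dropWhile p = x :: u) : p x = false := by
  induction l with
  | nil => simp at h
  | cons a t ih =>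
      rw [List.dropWhile_cons] at h
      by_cases hp : p a = true
      · exact ih (by simpa [hp] using h)
      · simp [hp] at h
        simp [← h.1, by simpa using hp]

theorem pvSetEq_pair_length (u : List Char) (a b : Char) (hab : a ≠ b) (hu : u.Nodup)
    (h : pvSetEq u [a, b] = true) : u.length = 2 := by
  simp only [pvSetEq, Bool.and_eq_true, List.all_eq_true, List.contains_eq_mem,
    decide_eq_true_eq] at h
  have hperm : u.Perm [a, b] := by
    refine (List.perm_ext_iff_of_nodup hu (by simp [hab])).2 ?_
    intro x
    constructor
    · intro hx; simpa using h.1 x hx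
    · intro hx
      rcases (by simpa using hx : x = a ∨ x = b) with rfl | rfl
      · exact h.2 x (by simp)
      · exact h.2 x (by simp)
  simpa using hperm.length_eq

-- pvIsBinary on a nodup list forces length 2
theorem pvIsBinary_length (u : List Char) (hu : u.Nodup) (hb : pvIsBinary u = true) :
    u.length = 2 := by
  simp only [pvIsBinary, Bool.or_eq_true] at hb
  rcases hb with ((((h | h) | h) | h) | h)
  · exact pvSetEq_pair_length u 'A' 'B' (by decide) hu h
  · exact pvSetEq_pair_length u 'E' 'U' (by decide) hu h
  · exact pvSetEq_pair_length u 'O' 'I' (by decide) hu h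
  · exact pvSetEq_pair_length u '0' '1' (by decide) hu h
  · exact pvSetEq_pair_length u 'X' 'O' (by decide) hu h

-- chunks of a uniform nonempty run followed by a class boundary
theorem pvChunks_append_run (g rest : List Char) (k : Bool) (hg : g ≠ [])
    (hall : ∀ d ∈ g, pvIsSym d = k)
    (hrest : ∀ c t, rest = c :: t → pvIsSym c ≠ k) :
    pvChunks (g ++ rest) = g :: pvChunks rest := by
  match g, hg with
  | c :: g', _ =>
    have hc : pvIsSym c = k := hall c (by simp)
    have hall' : ∀ x ∈ g', (fun d => pvIsSym d == pvIsSym c) x = true := by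
      intro x hx
      simp [hall x (by simp [hx]), hc]
    have htw : rest.takeWhile (fun d => pvIsSym d == pvIsSym c) = [] := by
      cases rest with
      | nil => simp
      | cons r t =>
          simp [hc, hrest r t rfl]
    have hdw : rest.dropWhile (fun d => pvIsSym d == pvIsSym c) = rest := by
      cases rest with
      | nil => simp
      | cons r t =>
          simp [hc, hrest r t rfl]
    rw [List.cons_append, pvChunks, pvTakeWhile_append _ _ _ hall',
      pvDropWhile_append _ _ _ hall', htw, hdw]
    simp

-- non-alphanumeric head contributes a single False
theorem pvChunksFlat_cons_nonsym (m : Int) (c : Char) (rest : List Char)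
    (hc : pvIsSym c = false) :
    pvChunksFlat m (c :: rest) = false :: pvChunksFlat m rest := by
  have ht : ∀ x ∈ rest.takeWhile (fun d => pvIsSym d == pvIsSym c), pvIsSym x = false := by
    intro x hx
    have hpx : (pvIsSym x == pvIsSym c) = true :=
      List.mem_takeWhile_imp (p := fun d => pvIsSym d == pvIsSym c) hx
    simpa [hc] using hpx
  have hsplit : rest.takeWhile (fun d => pvIsSym d == pvIsSym c) ++
      rest.dropWhile (fun d => pvIsSym d == pvIsSym c) = rest :=
    List.takeWhile_append_dropWhile
  cases htw : rest.takeWhile (fun d => pvIsSym d == pvIsSym c) with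
  | nil =>
      have hrest : rest.dropWhile (fun d => pvIsSym d == pvIsSym c) = rest := by
        rw [htw] at hsplit; simpa using hsplit
      rw [pvChunksFlat, pvChunks, htw, hrest]
      simp [pvChunksFlat, pvFlagB, hc]
  | cons x t' =>
      have hchunks : pvChunks rest =
          (x :: t') :: pvChunks (rest.dropWhile (fun d => pvIsSym d == pvIsSym c)) := by
        conv_lhs => rw [← hsplit, htw]
        refine pvChunks_append_run (x :: t') _ false (by simp) ?_ ?_
        · intro d hd; exact ht d (by rw [htw]; exact hd)
        · intro y u hy y_mem
          have : (pvIsSym y == pvIsSym c) = false := pvDropWhile_head _ rest y u hy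
          simp [hc] at this
          simp [this] at y_mem
      rw [pvChunksFlat, pvChunks, htw, pvChunksFlat, hchunks]
      have hx : pvIsSym x = false := ht x (by simp [htw])
      simp [pvFlagB, hc, hx, List.replicate_succ]

-- B's loop invariant
theorem pvLoopB_inv (m : Int) (cs : List Char) : ∀ (run : List Char) (k : Bool) (mask : List Bool),
    run ≠ [] → (∀ d ∈ run, pvIsSym d = k) →
    pvLoopB m cs mask run (some k) = mask ++ pvChunksFlat m (run ++ cs) := by
  induction cs with
  | nil =>
      intro run k mask hne hall
      have hchunks : pvChunks run = [run] := by
        conv_lhs => rw [← List.append_nil run]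
        rw [pvChunks_append_run run [] k hne hall (by intro c t h; simp at h)]
        simp [pvChunks]
      match run, hne with
      | c :: r', _ =>
        have hc : pvIsSym c = k := hall c (by simp)
        simp [pvLoopB, pvChunksFlat, hchunks, hc]
  | cons c rest ih =>
      intro run k mask hne hall
      by_cases hk : pvIsSym c = k
      · have : ¬ (run ≠ [] ∧ (some k : Option Bool) ≠ some (pvIsSym c)) := by simp [hk]
        rw [pvLoopB]
        simp only [hk]
        rw [ih (run ++ [c]) k mask (by simp) (by
          intro d hd
          rcases List.mem_append.1 hd with h | h
          · exact hall d h
          · simp at h; simpa [h] using hk)]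
        simp
      · have hcond : (run ≠ [] ∧ (some k : Option Bool) ≠ some (pvIsSym c)) := by
          exact ⟨hne, by simpa using fun h => hk h.symm⟩
        rw [pvLoopB]
        simp only [if_pos hcond]
        rw [ih [c] (pvIsSym c) _ (by simp) (by intro d hd; simp at hd; simp [hd])]
        have hchunks : pvChunks (run ++ (c :: rest)) = run :: pvChunks (c :: rest) :=
          pvChunks_append_run run (c :: rest) k hne hall (by
            intro x t h
            injection h with h1 _
            simpa [h1] using hk)
        match run, hne with
        | d :: r', _ =>
          have hd : pvIsSym d = k := hall d (by simp)
          have hchunks' : pvChunks (d :: (r' ++ c :: rest)) = (d :: r') :: pvChunks (c :: rest) := by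
            simpa using hchunks
          simp [pvChunksFlat, hchunks', hd, List.append_assoc]

theorem pvLoopB_top (m : Int) (cs : List Char) :
    pvLoopB m cs [] [] none = pvChunksFlat m cs := by
  cases cs with
  | nil => simp [pvLoopB, pvChunksFlat, pvChunks]
  | cons c rest =>
      rw [pvLoopB]
      simp only [ne_eq, not_true_eq_false, false_and, if_false, List.nil_append]
      rw [pvLoopB_inv m rest [c] (pvIsSym c) [] (by simp) (by intro d hd; simp at hd; simp [hd])]
      simp

-- writing True over positions i..j-1 of an all-False tail
theorem pvSetTrue_eq (M : List Bool) (r i j : Nat) (hM : M.length = i) (_hij : i ≤ j)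
    (hjr : j - i ≤ r) :
    pvSetTrue (M ++ List.replicate r false) i j =
      M ++ List.replicate (j - i) true ++ List.replicate (r - (j - i)) false := by
  unfold pvSetTrue
  -- generalize over k = j - i
  obtain ⟨k, hk⟩ : ∃ k, j - i = k := ⟨j - i, rfl⟩
  rw [hk] at hjr ⊢
  clear _hij hk
  induction k generalizing M i r with
  | zero => simp
  | succ k ih =>
      rw [List.range'_succ]
      have hr : ∃ r', r = r' + 1 := ⟨r - 1, by omega⟩
      obtain ⟨r', rfl⟩ := hr
      have hset : (M ++ List.replicate (r' + 1) false).set i true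
          = (M ++ [true]) ++ List.replicate r' false := by
        rw [List.set_append_right _ _ (by omega), hM]
        simp [List.replicate_succ]
      simp only [List.foldl_cons, hset]
      rw [ih (M ++ [true]) r' (i + 1) (by simp [hM]) (by omega)]
      simp [List.replicate_succ, List.append_assoc]

-- the inner scan reaches exactly the end of the maximal alphanumeric run
theorem pvScanEnd_eq (cs : List Char) : ∀ (fuel j : Nat), j ≤ cs.length →
    cs.length - j ≤ fuel →
    pvScanEnd cs j fuel = j + (List.takeWhile pvIsSym (cs.drop j)).length := by
  intro fuel
  induction fuel with
  | zero =>
      intro j hj hf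
      have hje : j = cs.length := by omega
      simp [pvScanEnd, hje, List.drop_length]
  | succ f ih =>
      intro j hj hf
      simp only [pvScanEnd]
      by_cases h : j < cs.length ∧ pvIsSym (cs.getD j ' ') = true
      · have hlt : j < cs.length := h.1
        have hdrop : cs.drop j = cs[j] :: cs.drop (j + 1) := List.drop_eq_getElem_cons hlt
        have hget : cs.getD j ' ' = cs[j] := List.getD_eq_getElem cs ' ' hlt
        rw [if_pos h, ih (j + 1) (by omega) (by omega), hdrop]
        rw [hget] at h
        simp [List.takeWhile, h.2]
        omega
      · rw [if_neg h]
        rcases Nat.lt_or_ge j cs.length with hlt | hge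
        · have hdrop : cs.drop j = cs[j] :: cs.drop (j + 1) := List.drop_eq_getElem_cons hlt
          have hget : cs.getD j ' ' = cs[j] := List.getD_eq_getElem cs ' ' hlt
          have hsym : pvIsSym cs[j] = false := by
            by_contra hc
            exact h ⟨hlt, by rw [hget]; simpa using hc⟩
          rw [hdrop]
          simp [List.takeWhile, hsym]
        · have : cs.drop j = [] := List.drop_eq_nil_of_le hge
          simp [this]

-- A's loop invariant
theorem pvLoopA_inv (cs : List Char) (m : Int) : ∀ (fuel i : Nat) (M : List Bool),
    M.length = i → i ≤ cs.length → cs.length - i ≤ fuel →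
    pvLoopA cs m (M ++ List.replicate (cs.length - i) false) i fuel =
      M ++ pvChunksFlat m (cs.drop i) := by
  intro fuel
  induction fuel with
  | zero =>
      intro i₀ M₀ hM₀ hi₀ hfuel
      have hie : i₀ = cs.length := by omega
      simp [pvLoopA, hie, pvChunksFlat, pvChunks, List.drop_length]
  | succ f ih =>
      intro i₀ M₀ hM₀ hi₀ hfuel
      by_cases hi : i₀ < cs.length
      · have hdrop : cs.drop i₀ = cs[i₀] :: cs.drop (i₀ + 1) := List.drop_eq_getElem_cons hi
        have hget : cs.getD i₀ ' ' = cs[i₀] := List.getD_eq_getElem cs ' ' hi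
        by_cases hsym : pvIsSym cs[i₀] = true
        · -- alphanumeric run branch
          have hj := pvScanEnd_eq cs (cs.length - i₀) i₀ (by omega) (by omega)
          set t := (cs.drop i₀).takeWhile pvIsSym with ht
          have htcons : t = cs[i₀] :: (cs.drop (i₀ + 1)).takeWhile pvIsSym := by
            rw [ht, hdrop, List.takeWhile_cons, if_pos hsym]
          have hjv : pvScanEnd cs i₀ (cs.length - i₀) = i₀ + t.length := hj
          have htlen : t.length ≤ cs.length - i₀ := by
            have h1 : t.length ≤ (cs.drop i₀).length :=
              (List.takeWhile_prefix pvIsSym).length_le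
            simpa using h1
          have htpos : 0 < t.length := by rw [htcons]; simp
          have hrun : (cs.drop i₀).take (pvScanEnd cs i₀ (cs.length - i₀) - i₀) = t := by
            rw [hjv]
            simpa using ((List.prefix_iff_eq_take).1 (List.takeWhile_prefix pvIsSym)).symm
          have hdropj : cs.drop (pvScanEnd cs i₀ (cs.length - i₀)) = (cs.drop i₀).dropWhile pvIsSym := by
            rw [hjv, ← List.drop_drop]
            conv_lhs => rw [show cs.drop i₀ = t ++ (cs.drop i₀).dropWhile pvIsSym from
              (List.takeWhile_append_dropWhile).symm]
            rw [List.drop_left' rfl]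
          -- the branch condition equals B's flag
          have hflag : ((PySem.Set.ofList t).length == 2 &&
              decide (m ≤ (t.length : Int)) && pvIsBinary (PySem.Set.ofList t))
              = pvFlagB m true t := by
            by_cases hb : pvIsBinary (PySem.Set.ofList t) = true
            · have h2 : (PySem.Set.ofList t).length = 2 :=
                pvIsBinary_length _ (PySem.Set.nodup_ofList t) hb
              simp [pvFlagB, hb, h2]
            · simp [pvFlagB, Bool.eq_false_iff.2 hb]
          -- chunk decomposition at i₀
          have hchunk : pvChunksFlat m (cs.drop i₀) =
              List.replicate t.length (pvFlagB m true t) ++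
                pvChunksFlat m (cs.drop (pvScanEnd cs i₀ (cs.length - i₀))) := by
            rw [pvChunksFlat]
            conv_lhs => rw [hdrop, pvChunks]
            have hpred : (fun d => pvIsSym d == pvIsSym cs[i₀]) = pvIsSym := by
              funext d; simp [hsym]
            rw [hpred, hdropj]
            have hhead : cs[i₀] :: (cs.drop (i₀ + 1)).takeWhile pvIsSym = t := htcons.symm
            rw [List.flatMap_cons, hhead]
            have hheadt : pvIsSym (t.headD ' ') = true := by rw [htcons]; simpa using hsym
            rw [hheadt]
            have hdw2 : (cs.drop i₀).dropWhile pvIsSym = (cs.drop (i₀ + 1)).dropWhile pvIsSym := by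
              rw [hdrop, List.dropWhile_cons]
              simp [hsym]
            rw [hdw2]
            rfl
          simp only [pvLoopA]
          simp only [if_pos hi, hget, hsym, not_true_eq_false, if_false]
          rw [hrun, hflag]
          have hmask : (if pvFlagB m true t = true
                then pvSetTrue (M₀ ++ List.replicate (cs.length - i₀) false) i₀ (pvScanEnd cs i₀ (cs.length - i₀))
                else M₀ ++ List.replicate (cs.length - i₀) false)
              = (M₀ ++ List.replicate t.length (pvFlagB m true t)) ++
                  List.replicate (cs.length - (i₀ + t.length)) false := by
            have e1 : pvScanEnd cs i₀ (cs.length - i₀) - i₀ = t.length := by omega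
            have e2 : cs.length - i₀ - t.length = cs.length - (i₀ + t.length) := by omega
            by_cases hf : pvFlagB m true t = true
            · rw [if_pos hf, pvSetTrue_eq M₀ (cs.length - i₀) i₀ (pvScanEnd cs i₀ (cs.length - i₀)) hM₀
                (by omega) (by omega), e1, e2, hf]
            · have hff : pvFlagB m true t = false := by
                revert hf; cases pvFlagB m true t <;> simp
              rw [if_neg hf, hff,
                show cs.length - i₀ = t.length + (cs.length - (i₀ + t.length)) by omega,
                List.replicate_add, ← List.append_assoc]
          rw [hmask, hjv, ih (i₀ + t.length) (M₀ ++ List.replicate t.length (pvFlagB m true t))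
            (by simp [hM₀]) (by omega) (by omega), hchunk, hjv]
          simp [List.append_assoc]
        · -- non-alphanumeric character: skip one position
          have hsym' : pvIsSym cs[i₀] = false := by simpa using hsym
          simp only [pvLoopA]
          simp only [if_pos hi, hget, hsym', not_false_eq_true, if_true,
            Bool.false_eq_true]
          have hrepl : M₀ ++ List.replicate (cs.length - i₀) false
              = (M₀ ++ [false]) ++ List.replicate (cs.length - (i₀ + 1)) false := by
            rw [show cs.length - i₀ = 1 + (cs.length - (i₀ + 1)) by omega,
              List.replicate_add, List.append_assoc]
            rfl
          rw [hrepl, ih (i₀ + 1) (M₀ ++ [false]) (by simp [hM₀]) (by omega) (by omega)]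
          rw [hdrop, pvChunksFlat_cons_nonsym m _ _ hsym']
          simp
      · have hie : i₀ = cs.length := by omega
        simp [pvLoopA, hie, pvChunksFlat, pvChunks, List.drop_length]

-- ===== VERDICT (by name: the statement is the Claim_ definition above) =====
theorem find_two_letter_runs_py_spec : Claim_equal_find_two_letter_runs_py := by
  intro CT_UP min_run _
  unfold Spec_find_two_letter_runs_py find_two_letter_runs_py find_two_letter_runs_py_alt
  have hA := pvLoopA_inv CT_UP.toList min_run CT_UP.toList.length 0 [] rfl (Nat.zero_le _)
    (by omega)
  simpa [pvLoopB_top] using hA
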